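-- pv_equiv track=rewrite | github.com/Mithil1302/Engineering-Brain | worker-service/app/architecture/graph_integration.py | _label_from_node_id
-- ===== SOURCE A (Python) =====
-- def _label_from_node_id(node_id: str) -> str:
--     """Derive a Neo4j label from the node_id prefix convention."""
--     prefix_map = {
--         "service:": "Service",
--         "endpoint:": "Endpoint",
--         "decision:": "Decision",
--         "adr:": "ADR",
--         "constraint:": "Constraint",
--         "autofix:": "AutofixRun",
--         "repo:": "Repo",
--         "file:": "File",
--     }
--     for prefix, label in prefix_map.items():
--         if node_id.startswith(prefix):
--             return label
--     return "Entity"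
-- ===== SOURCE B (Python) =====
-- def _label_from_node_id(node_id: str) -> str:
--     """Derive a Neo4j label from the node_id prefix convention."""
--     table = {
--         "service": "Service",
--         "endpoint": "Endpoint",
--         "decision": "Decision",
--         "adr": "ADR",
--         "constraint": "Constraint",
--         "autofix": "AutofixRun",
--         "repo": "Repo",
--         "file": "File",
--     }
--     head, sep, _tail = node_id.partition(":")
--     return table.get(head, "Entity") if sep else "Entity"
-- ===== Notes on version B (the rewrite author's own statement) =====
-- stated objective: simpler
-- what changed: Replaces the loop scanning eight startswith prefixes with a single partition at the first ':' followed by one dict lookup of the head segment.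
import Mathlib
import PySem

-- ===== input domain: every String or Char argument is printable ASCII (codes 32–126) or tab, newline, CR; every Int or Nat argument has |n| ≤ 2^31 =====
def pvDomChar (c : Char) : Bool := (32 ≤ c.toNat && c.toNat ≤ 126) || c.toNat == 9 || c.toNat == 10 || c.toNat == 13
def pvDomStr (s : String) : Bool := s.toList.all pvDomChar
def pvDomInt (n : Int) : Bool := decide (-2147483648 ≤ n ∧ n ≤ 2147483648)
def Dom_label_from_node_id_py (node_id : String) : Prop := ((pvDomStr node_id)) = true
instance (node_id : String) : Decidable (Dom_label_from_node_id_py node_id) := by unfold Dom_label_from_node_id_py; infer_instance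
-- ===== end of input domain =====

-- B replaces A's loop over eight startswith prefixes by partitioning node_id at the
-- first ':' and looking the head segment up in a dict once (objective: simpler).


-- ===== PORT A =====
def pvPrefixMap : PySem.Dict String String := PySem.Dict.mk
  [("service:", "Service"), ("endpoint:", "Endpoint"), ("decision:", "Decision"),
   ("adr:", "ADR"), ("constraint:", "Constraint"), ("autofix:", "AutofixRun"),
   ("repo:", "Repo"), ("file:", "File")]

-- the 'for prefix, label in prefix_map.items(): if node_id.startswith(prefix): return label' loop
def pvLoopA : List (String × String) → String → String
  | [], _ => "Entity"
  | (p, l) :: rest, s => if PySem.Str.startswith s p then l else pvLoopA rest s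

def label_from_node_id_py (node_id : String) : String :=
  pvLoopA (PySem.Dict.items pvPrefixMap) node_id

-- ===== PORT B =====
def pvTable : PySem.Dict String String := PySem.Dict.mk
  [("service", "Service"), ("endpoint", "Endpoint"), ("decision", "Decision"),
   ("adr", "ADR"), ("constraint", "Constraint"), ("autofix", "AutofixRun"),
   ("repo", "Repo"), ("file", "File")]

-- node_id.partition(":") ported by hand (exact: head = chars before the first ':',
-- the separator piece is nonempty iff ':' occurs in node_id)
def label_from_node_id_py_alt (node_id : String) : String :=
  let cs := node_id.toList
  if ':' ∈ cs then
    PySem.Dict.getD pvTable (String.ofList (cs.takeWhile (· ≠ ':'))) "Entity"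
  else "Entity"

-- ===== PRECONDITION & SPEC =====
def Spec_label_from_node_id_py (node_id : String) (out : String) : Prop := out = label_from_node_id_py_alt node_id
instance (node_id : String) (out : String) : Decidable (Spec_label_from_node_id_py node_id out) := by unfold Spec_label_from_node_id_py; infer_instance

-- ===== CLAIM (what is proved, stated in full; the proofs are below) =====
def Claim_equal_label_from_node_id_py : Prop := ∀ (node_id : String), Dom_label_from_node_id_py node_id → Spec_label_from_node_id_py node_id (label_from_node_id_py node_id)

-- ===== LEMMAS AND PROOFS =====

-- a prefix 'p ++ ":"' (with ':' ∉ p) starts cs ⟺ ':' occurs in cs and the segment before the first ':' is p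
theorem pv_core (p : List Char) (hp : ':' ∉ p) : ∀ cs : List Char,
    ((p ++ [':']) <+: cs ↔ ':' ∈ cs ∧ cs.takeWhile (· ≠ ':') = p) := by
  induction p with
  | nil =>
    intro cs
    cases cs with
    | nil => simp
    | cons c t =>
      by_cases h : c = ':'
      · subst h; simp [List.takeWhile, List.cons_prefix_cons]
      · simp [List.takeWhile, h, List.cons_prefix_cons, Ne.symm h]
  | cons a p ih =>
    have ha : a ≠ ':' := fun h => hp (by simp [h])
    have hp' : ':' ∉ p := fun h => hp (List.mem_cons_of_mem _ h)
    intro cs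
    cases cs with
    | nil => simp
    | cons c t =>
      by_cases hca : c = a
      · subst hca
        simp [List.cons_prefix_cons, List.takeWhile, ha, ih hp' t, Ne.symm ha]
      · by_cases hc : c = ':'
        · subst hc
          simp [List.cons_prefix_cons, List.takeWhile, Ne.symm hca]
        · simp [List.cons_prefix_cons, List.takeWhile, hc, hca, Ne.symm hca]

theorem pv_startswith_eq (s : String) (p : List Char) (hp : ':' ∉ p) (hc : ':' ∈ s.toList) :
    PySem.Str.startswith s (String.ofList (p ++ [':'])) =
      decide (s.toList.takeWhile (· ≠ ':') = p) := by
  have h1 : PySem.Str.startswith s (String.ofList (p ++ [':'])) =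
      PySem.Chars.startswith s.toList (p ++ [':']) := by
    simp [PySem.Str.startswith]
  rw [h1]
  by_cases hd : s.toList.takeWhile (· ≠ ':') = p
  · have ht : PySem.Chars.startswith s.toList (p ++ [':']) = true := by
      rw [PySem.Chars.startswith_iff]
      exact (pv_core p hp s.toList).mpr ⟨hc, hd⟩
    simp only [ht, true_eq_decide_iff]
    exact hd
  · have hf : PySem.Chars.startswith s.toList (p ++ [':']) = false := by
      rw [Bool.eq_false_iff, Ne, PySem.Chars.startswith_iff]
      intro hpre
      exact hd ((pv_core p hp s.toList).mp hpre).2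
    simp only [hf]
    symm
    rw [decide_eq_false_iff_not]
    exact fun h => hd (by simpa using h)

theorem pv_startswith_false (s : String) (p : List Char) (hc : ':' ∉ s.toList) :
    PySem.Str.startswith s (String.ofList (p ++ [':'])) = false := by
  have h1 : PySem.Str.startswith s (String.ofList (p ++ [':'])) =
      PySem.Chars.startswith s.toList (p ++ [':']) := by
    simp [PySem.Str.startswith]
  rw [h1, Bool.eq_false_iff, Ne, PySem.Chars.startswith_iff]
  rintro ⟨t, ht⟩
  exact hc (by rw [← ht]; simp)

theorem pv_beq_ofList (s : String) (l : List Char) :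
    (s == String.ofList l) = decide (l = s.toList) := by
  by_cases hl : l = s.toList
  · subst hl; simp
  · simp only [hl, decide_false]
    rw [Bool.eq_false_iff, Ne, beq_iff_eq]
    intro h
    exact hl (by rw [h, String.toList_ofList])

-- ===== VERDICT (by name: the statement is the Claim_ definition above) =====
theorem label_from_node_id_py_spec : Claim_equal_label_from_node_id_py := by
  intro s _
  unfold Spec_label_from_node_id_py label_from_node_id_py label_from_node_id_py_alt
  unfold pvPrefixMap pvTable
  by_cases hc : ':' ∈ s.toList
  · rw [if_pos hc]
    have e1 := pv_startswith_eq s "service".toList (by decide) hc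
    have e2 := pv_startswith_eq s "endpoint".toList (by decide) hc
    have e3 := pv_startswith_eq s "decision".toList (by decide) hc
    have e4 := pv_startswith_eq s "adr".toList (by decide) hc
    have e5 := pv_startswith_eq s "constraint".toList (by decide) hc
    have e6 := pv_startswith_eq s "autofix".toList (by decide) hc
    have e7 := pv_startswith_eq s "repo".toList (by decide) hc
    have e8 := pv_startswith_eq s "file".toList (by decide) hc
    simp only [pvLoopA,
      show ("service:" : String) = String.ofList ("service".toList ++ [':']) from by decide,
      show ("endpoint:" : String) = String.ofList ("endpoint".toList ++ [':']) from by decide,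
      show ("decision:" : String) = String.ofList ("decision".toList ++ [':']) from by decide,
      show ("adr:" : String) = String.ofList ("adr".toList ++ [':']) from by decide,
      show ("constraint:" : String) = String.ofList ("constraint".toList ++ [':']) from by decide,
      show ("autofix:" : String) = String.ofList ("autofix".toList ++ [':']) from by decide,
      show ("repo:" : String) = String.ofList ("repo".toList ++ [':']) from by decide,
      show ("file:" : String) = String.ofList ("file".toList ++ [':']) from by decide,
      e1, e2, e3, e4, e5, e6, e7, e8,
      PySem.Dict.getD, PySem.Dict.get?_mk_cons, pv_beq_ofList]
    split_ifs <;> simp_all [PySem.Dict.get?]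
  · rw [if_neg hc]
    have f1 := pv_startswith_false s "service".toList hc
    have f2 := pv_startswith_false s "endpoint".toList hc
    have f3 := pv_startswith_false s "decision".toList hc
    have f4 := pv_startswith_false s "adr".toList hc
    have f5 := pv_startswith_false s "constraint".toList hc
    have f6 := pv_startswith_false s "autofix".toList hc
    have f7 := pv_startswith_false s "repo".toList hc
    have f8 := pv_startswith_false s "file".toList hc
    simp only [pvLoopA,
      show ("service:" : String) = String.ofList ("service".toList ++ [':']) from by decide,
      show ("endpoint:" : String) = String.ofList ("endpoint".toList ++ [':']) from by decide,
      show ("decision:" : String) = String.ofList ("decision".toList ++ [':']) from by decide,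
      show ("adr:" : String) = String.ofList ("adr".toList ++ [':']) from by decide,
      show ("constraint:" : String) = String.ofList ("constraint".toList ++ [':']) from by decide,
      show ("autofix:" : String) = String.ofList ("autofix".toList ++ [':']) from by decide,
      show ("repo:" : String) = String.ofList ("repo".toList ++ [':']) from by decide,
      show ("file:" : String) = String.ofList ("file".toList ++ [':']) from by decide,
      f1, f2, f3, f4, f5, f6, f7, f8]
    simp
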